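-- pv_equiv track=rewrite | github.com/Raunakg2005/ly-project | backend/app/services/file_validator.py | _is_type_variation
-- ===== SOURCE A (Python) =====
-- def _is_type_variation(type1: str, type2: str) -> bool:
--     """Check if two MIME types are variations of the same type"""
--     variations = [
--         ('image/jpg', 'image/jpeg'),
--         ('application/x-pdf', 'application/pdf'),
--     ]
--
--     for var1, var2 in variations:
--         if (type1 == var1 and type2 == var2) or (type1 == var2 and type2 == var1):
--             return True
--     return False
-- ===== SOURCE B (Python) =====
-- _CANON = {
--     'image/jpg': 'image/jpeg',
--     'application/x-pdf': 'application/pdf',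
-- }
--
-- def _is_type_variation(type1: str, type2: str) -> bool:
--     norm1 = _CANON.get(type1, type1)
--     norm2 = _CANON.get(type2, type2)
--     return norm1 == norm2 and type1 != type2
-- ===== Notes on version B (the rewrite author's own statement) =====
-- stated objective: simpler
-- what changed: Replaces the both-order scan over a pair list with a canonicalization dict lookup: normalize each type, compare the normal forms, and require the inputs to differ.
import Mathlib
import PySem

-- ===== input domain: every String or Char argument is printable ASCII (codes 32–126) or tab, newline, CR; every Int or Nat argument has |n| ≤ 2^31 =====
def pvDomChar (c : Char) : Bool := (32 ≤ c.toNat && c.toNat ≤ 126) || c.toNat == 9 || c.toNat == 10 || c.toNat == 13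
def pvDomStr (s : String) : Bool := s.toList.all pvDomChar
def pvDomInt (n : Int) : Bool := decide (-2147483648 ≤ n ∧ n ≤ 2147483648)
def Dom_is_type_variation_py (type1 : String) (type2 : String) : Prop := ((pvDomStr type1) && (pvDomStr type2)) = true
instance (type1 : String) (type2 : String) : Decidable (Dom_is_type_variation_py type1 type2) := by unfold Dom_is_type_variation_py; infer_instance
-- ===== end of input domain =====

-- B replaces the both-order pair-list scan with a canonicalization-dict lookup plus one comparison (objective: simpler).
-- ===== PORT A =====
-- the for-loop over 'variations' with early return, as structural recursion over the same list
def pvVarLoop (type1 : String) (type2 : String) : List (String × String) → Bool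
  | [] => false
  | (var1, var2) :: rest =>
    if (type1 == var1 && type2 == var2) || (type1 == var2 && type2 == var1) then true
    else pvVarLoop type1 type2 rest

def is_type_variation_py (type1 : String) (type2 : String) : Bool :=
  let variations : List (String × String) :=
    [("image/jpg", "image/jpeg"), ("application/x-pdf", "application/pdf")]
  pvVarLoop type1 type2 variations

-- ===== PORT B =====
-- the module-level canonicalization dict _CANON
def pvCanon : PySem.Dict String String :=
  PySem.Dict.ofList [("image/jpg", "image/jpeg"), ("application/x-pdf", "application/pdf")]

def is_type_variation_py_alt (type1 : String) (type2 : String) : Bool :=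
  let norm1 := pvCanon.getD type1 type1
  let norm2 := pvCanon.getD type2 type2
  norm1 == norm2 && !(type1 == type2)

-- ===== PRECONDITION & SPEC =====
def Spec_is_type_variation_py (type1 : String) (type2 : String) (out : Bool) : Prop := out = is_type_variation_py_alt type1 type2
instance (type1 : String) (type2 : String) (out : Bool) : Decidable (Spec_is_type_variation_py type1 type2 out) := by unfold Spec_is_type_variation_py; infer_instance

-- ===== CLAIM (what is proved, stated in full; the proofs are below) =====
def Claim_equal_is_type_variation_py : Prop := ∀ (type1 : String) (type2 : String), Dom_is_type_variation_py type1 type2 → Spec_is_type_variation_py type1 type2 (is_type_variation_py type1 type2)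

-- ===== LEMMAS AND PROOFS =====

-- characterization of the canonicalization lookup
theorem pvCanon_getD (t : String) :
    pvCanon.getD t t =
      if t = "image/jpg" then "image/jpeg"
      else if t = "application/x-pdf" then "application/pdf" else t := by
  have h : pvCanon =
      PySem.Dict.mk [("image/jpg", "image/jpeg"), ("application/x-pdf", "application/pdf")] := by
    decide
  by_cases h1 : t = "image/jpg"
  · subst h1; decide
  · by_cases h2 : t = "application/x-pdf"
    · subst h2; decide
    · rw [h]
      simp [PySem.Dict.getD, PySem.Dict.get?,
        beq_iff_eq, h1, h2, Ne.symm h1, Ne.symm h2]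

-- ===== VERDICT (by name: the statement is the Claim_ definition above) =====
theorem is_type_variation_py_spec : Claim_equal_is_type_variation_py := by
  intro type1 type2 _
  unfold Spec_is_type_variation_py is_type_variation_py is_type_variation_py_alt
  simp only [pvCanon_getD]
  by_cases h1 : type1 = "image/jpg" <;>
  by_cases h2 : type1 = "image/jpeg" <;>
  by_cases h3 : type1 = "application/x-pdf" <;>
  by_cases h4 : type1 = "application/pdf" <;>
  by_cases h5 : type2 = "image/jpg" <;>
  by_cases h6 : type2 = "image/jpeg" <;>
  by_cases h7 : type2 = "application/x-pdf" <;>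
  by_cases h8 : type2 = "application/pdf" <;>
  simp_all [pvVarLoop] <;>
  (intro hx; subst hx; simp_all)
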